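-- pv_equiv track=rewrite | github.com/junebash/junebash.com | scripts/migrate_content.py | convert_categories_to_tags
-- ===== SOURCE A (Python) =====
-- CATEGORY_TAG_MAPPING = {
--     'Code': ['programming'],
--     'Music': ['music'],
--     'Dharma': ['meditation', 'philosophy'],
--     'Personal': ['personal'],
--     'Games & Films': ['gamedev', 'film'],
--     'Productivity': ['productivity'],
--     'News': ['updates'],
--     'Micro': ['microblog'],
--     'Quotes': ['quotes']
-- }
--
-- def convert_categories_to_tags(categories, title, content):
--     """Convert Jekyll categories to Zola tags with smart mapping"""
--     if not categories:
--         return []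
--
--     tags = set()
--
--     # Map categories to base tags
--     for category in categories:
--         if category in CATEGORY_TAG_MAPPING:
--             tags.update(CATEGORY_TAG_MAPPING[category])
--         else:
--             # Fallback: convert category to lowercase, replace spaces with hyphens
--             tags.add(category.lower().replace(' ', '-').replace('&', 'and'))
--
--     # Add specific tags based on content analysis
--     title_lower = title.lower() if title else ''
--     content_lower = content.lower()
--
--     if 'Code' in categories:
--         # Add Swift/iOS specific tags
--         if any(keyword in title_lower or keyword in content_lower[:500]
--                for keyword in ['swift', 'ios', 'property wrapper', 'swiftui']):
--             tags.update(['swift', 'ios'])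
--
--         if any(keyword in title_lower or keyword in content_lower[:500]
--                for keyword in ['combine', 'publisher', 'subscriber']):
--             tags.add('combine')
--
--         if any(keyword in title_lower or keyword in content_lower[:500]
--                for keyword in ['swiftui', 'view', 'modifier']):
--             tags.add('swiftui')
--
--         if any(keyword in title_lower or keyword in content_lower[:500]
--                for keyword in ['test', 'testing', 'unit test']):
--             tags.add('testing')
--
--     return sorted(list(tags))
-- ===== SOURCE B (Python) =====
-- CATEGORY_TAG_MAPPING = {
--     'Code': ['programming'],
--     'Music': ['music'],
--     'Dharma': ['meditation', 'philosophy'],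
--     'Personal': ['personal'],
--     'Games & Films': ['gamedev', 'film'],
--     'Productivity': ['productivity'],
--     'News': ['updates'],
--     'Micro': ['microblog'],
--     'Quotes': ['quotes']
-- }
--
-- # Flat keyword -> tags map: every single keyword directly names the tags it
-- # triggers (the grouped rules of A, distributed keyword by keyword; 'swiftui'
-- # triggers both the swift/ios group and the swiftui group, hence its 3 tags).
-- KEYWORD_TAGS = [
--     ('swift', ['swift', 'ios']),
--     ('ios', ['swift', 'ios']),
--     ('property wrapper', ['swift', 'ios']),
--     ('swiftui', ['swift', 'ios', 'swiftui']),
--     ('combine', ['combine']),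
--     ('publisher', ['combine']),
--     ('subscriber', ['combine']),
--     ('view', ['swiftui']),
--     ('modifier', ['swiftui']),
--     ('test', ['testing']),
--     ('testing', ['testing']),
--     ('unit test', ['testing']),
-- ]
--
--
-- def _uniq_sorted(xs):
--     """Adjacent-duplicate removal on a sorted list (single scan)."""
--     out = []
--     for t in xs:
--         if not out or out[-1] != t:
--             out.append(t)
--     return out
--
--
-- def convert_categories_to_tags(categories, title, content):
--     """Convert Jekyll categories to Zola tags with smart mapping"""
--     # collect tags WITH duplicates, then sort and strip adjacent duplicates
--     raw = []
--     for c in categories: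
--         if c in CATEGORY_TAG_MAPPING:
--             raw.extend(CATEGORY_TAG_MAPPING[c])
--         else:
--             raw.append(c.lower().replace(' ', '-').replace('&', 'and'))
--     if 'Code' in categories:
--         title_l = (title or '').lower()
--         body = content.lower()[:500]
--         for kw, ts in KEYWORD_TAGS:
--             if kw in title_l or kw in body:
--                 raw.extend(ts)
--     return _uniq_sorted(sorted(raw))
-- ===== Notes on version B (the rewrite author's own statement) =====
-- stated objective: alternative
-- what changed: B never builds a set: it collects tags with duplicates into a plain list via a flat per-keyword keyword->tags map (A's four grouped conditionals distributed keyword by keyword), then sorts the raw list and strips adjacent duplicates with a recursive helper, whereas A maintains a deduplicating set through grouped any()-gated updates and sorts it at the end.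
import Mathlib
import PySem

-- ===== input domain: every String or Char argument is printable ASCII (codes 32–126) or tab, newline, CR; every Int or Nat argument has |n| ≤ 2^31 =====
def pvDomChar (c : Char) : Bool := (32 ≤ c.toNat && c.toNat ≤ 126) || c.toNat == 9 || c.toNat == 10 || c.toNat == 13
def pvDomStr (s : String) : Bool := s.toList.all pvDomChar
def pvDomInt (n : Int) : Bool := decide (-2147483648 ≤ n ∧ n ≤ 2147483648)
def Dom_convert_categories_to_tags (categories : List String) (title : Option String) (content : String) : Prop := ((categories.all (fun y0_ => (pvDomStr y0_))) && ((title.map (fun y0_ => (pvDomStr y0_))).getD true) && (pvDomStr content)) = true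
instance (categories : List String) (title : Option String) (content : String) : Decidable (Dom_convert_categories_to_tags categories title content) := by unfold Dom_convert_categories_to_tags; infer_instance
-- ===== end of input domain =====

-- B collects tags as a plain list with duplicates via a flat keyword→tags map (instead of A's
-- set plus four grouped conditionals), then sorts and strips adjacent duplicates recursively: alternative decomposition.


-- ===== PORT A =====
def CATEGORY_TAG_MAPPING : PySem.Dict String (List String) :=
  PySem.Dict.ofList [("Code", ["programming"]), ("Music", ["music"]), ("Dharma", ["meditation", "philosophy"]),
   ("Personal", ["personal"]), ("Games & Films", ["gamedev", "film"]),
   ("Productivity", ["productivity"]), ("News", ["updates"]), ("Micro", ["microblog"]),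
   ("Quotes", ["quotes"])]

-- category.lower().replace(' ', '-').replace('&', 'and')
def pvFallback (category : String) : String :=
  PySem.Str.replace (PySem.Str.replace (PySem.Str.lower category) " " "-") "&" "and"

def convert_categories_to_tags (categories : List String) (title : Option String) (content : String) : List String :=
  if categories.isEmpty then []
  else
    let tags : PySem.Set String :=
      categories.foldl (fun tags category =>
        match PySem.Dict.get? CATEGORY_TAG_MAPPING category with
        | some v => PySem.Set.update tags v
        | none => PySem.Set.add tags (pvFallback category)) PySem.Set.empty
    -- title.lower() if title else ''  (empty string is falsy)
    let title_lower := match title with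
      | some t => if t = "" then "" else PySem.Str.lower t
      | none => ""
    let content_lower := PySem.Str.lower content
    let tags :=
      if categories.contains "Code" then
        let tags := if (["swift", "ios", "property wrapper", "swiftui"]).any (fun k =>
            PySem.Str.isIn k title_lower || PySem.Str.isIn k (PySem.Str.slice content_lower none (some 500)))
          then PySem.Set.update tags ["swift", "ios"] else tags
        let tags := if (["combine", "publisher", "subscriber"]).any (fun k =>
            PySem.Str.isIn k title_lower || PySem.Str.isIn k (PySem.Str.slice content_lower none (some 500)))
          then PySem.Set.add tags "combine" else tags
        let tags := if (["swiftui", "view", "modifier"]).any (fun k =>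
            PySem.Str.isIn k title_lower || PySem.Str.isIn k (PySem.Str.slice content_lower none (some 500)))
          then PySem.Set.add tags "swiftui" else tags
        let tags := if (["test", "testing", "unit test"]).any (fun k =>
            PySem.Str.isIn k title_lower || PySem.Str.isIn k (PySem.Str.slice content_lower none (some 500)))
          then PySem.Set.add tags "testing" else tags
        tags
      else tags
    PySem.List.sorted tags (fun x => x) false

-- ===== PORT B =====
-- flat keyword -> tags map (A's grouped rules distributed keyword by keyword)
def KEYWORD_TAGS : List (String × List String) :=
  [("swift", ["swift", "ios"]),
   ("ios", ["swift", "ios"]),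
   ("property wrapper", ["swift", "ios"]),
   ("swiftui", ["swift", "ios", "swiftui"]),
   ("combine", ["combine"]),
   ("publisher", ["combine"]),
   ("subscriber", ["combine"]),
   ("view", ["swiftui"]),
   ("modifier", ["swiftui"]),
   ("test", ["testing"]),
   ("testing", ["testing"]),
   ("unit test", ["testing"])]

-- _uniq_sorted: single-scan adjacent-duplicate removal (out[-1] guarded by `not out`,
-- so the pyGetD default is never read)
def pvUniqSorted (xs : List String) : List String :=
  xs.foldl (fun out t =>
    if out.isEmpty || (PySem.List.pyGetD out (-1) "" != t) then out ++ [t] else out) []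

def convert_categories_to_tags_alt (categories : List String) (title : Option String) (content : String) : List String :=
  let raw : List String :=
    categories.foldl (fun raw c =>
      match PySem.Dict.get? CATEGORY_TAG_MAPPING c with
      | some v => raw ++ v
      | none => raw ++ [pvFallback c]) []
  let raw :=
    if categories.contains "Code" then
      -- (title or '').lower(): '' both for None and for an empty title, so getD "" is exact
      let title_l := PySem.Str.lower (title.getD "")
      let body := PySem.Str.slice (PySem.Str.lower content) none (some 500)
      KEYWORD_TAGS.foldl (fun raw kt =>
        if PySem.Str.isIn kt.1 title_l || PySem.Str.isIn kt.1 body then raw ++ kt.2 else raw) raw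
    else raw
  pvUniqSorted (PySem.List.sorted raw (fun x => x) false)

-- ===== PRECONDITION & SPEC =====
def Spec_convert_categories_to_tags (categories : List String) (title : Option String) (content : String) (out : List String) : Prop := out = convert_categories_to_tags_alt categories title content
instance (categories : List String) (title : Option String) (content : String) (out : List String) : Decidable (Spec_convert_categories_to_tags categories title content out) := by unfold Spec_convert_categories_to_tags; infer_instance

-- ===== CLAIM (what is proved, stated in full; the proofs are below) =====
def Claim_equal_convert_categories_to_tags : Prop := ∀ (categories : List String) (title : Option String) (content : String), Dom_convert_categories_to_tags categories title content → Spec_convert_categories_to_tags categories title content (convert_categories_to_tags categories title content)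

-- ===== LEMMAS AND PROOFS =====

-- A's category loop builds exactly the set of the flattened base tags.
def pvBaseTags (c : String) : List String :=
  match PySem.Dict.get? CATEGORY_TAG_MAPPING c with
  | some v => v
  | none => [pvFallback c]

theorem pv_loop_eq_update (cs : List String) (s : PySem.Set String) :
    cs.foldl (fun tags category =>
        match PySem.Dict.get? CATEGORY_TAG_MAPPING category with
        | some v => PySem.Set.update tags v
        | none => PySem.Set.add tags (pvFallback category)) s
      = PySem.Set.update s (cs.flatMap pvBaseTags) := by
  induction cs generalizing s with
  | nil => simp [PySem.Set.update_nil]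
  | cons c cs ih =>
    simp only [List.foldl_cons, List.flatMap_cons, ih, PySem.Set.update_append, pvBaseTags]
    cases h : PySem.Dict.get? CATEGORY_TAG_MAPPING c <;>
      simp [PySem.Set.update_cons, PySem.Set.update_nil]

theorem pv_loop_eq_ofList (cs : List String) :
    cs.foldl (fun tags category =>
        match PySem.Dict.get? CATEGORY_TAG_MAPPING category with
        | some v => PySem.Set.update tags v
        | none => PySem.Set.add tags (pvFallback category)) PySem.Set.empty
      = PySem.Set.ofList (cs.flatMap pvBaseTags) := by
  rw [pv_loop_eq_update]
  exact PySem.Set.update_nil_left _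

-- B's category loop collects exactly the flattened base tags.
theorem pv_raw_eq_flatMap (cs : List String) :
    cs.foldl (fun raw c =>
      match PySem.Dict.get? CATEGORY_TAG_MAPPING c with
      | some v => raw ++ v
      | none => raw ++ [pvFallback c]) []
      = cs.flatMap pvBaseTags := by
  have h : (fun (raw : List String) c =>
      match PySem.Dict.get? CATEGORY_TAG_MAPPING c with
      | some v => raw ++ v
      | none => raw ++ [pvFallback c]) = (fun raw c => raw ++ pvBaseTags c) := by
    funext raw c
    unfold pvBaseTags
    cases PySem.Dict.get? CATEGORY_TAG_MAPPING c <;> rfl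
  rw [h, PySem.List.foldl_append_eq_flatMap]
  rfl

theorem pv_title_eq (title : Option String) :
    (match title with
      | some t => if t = "" then "" else PySem.Str.lower t
      | none => "") = PySem.Str.lower (title.getD "") := by
  cases title with
  | none => decide
  | some t =>
    by_cases h : t = "" <;> simp [h]
    decide

-- B's keyword loop appends exactly the flattened matched-entry tags.
theorem pv_kw_foldl (tl body : String) (acc : List String) :
    KEYWORD_TAGS.foldl (fun raw kt =>
      if PySem.Str.isIn kt.1 tl || PySem.Str.isIn kt.1 body then raw ++ kt.2 else raw) acc
    = acc ++ KEYWORD_TAGS.flatMap (fun kt =>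
        if PySem.Str.isIn kt.1 tl || PySem.Str.isIn kt.1 body then kt.2 else []) := by
  have h : (fun (raw : List String) (kt : String × List String) =>
      if PySem.Str.isIn kt.1 tl || PySem.Str.isIn kt.1 body then raw ++ kt.2 else raw)
      = (fun raw kt => raw ++ (if PySem.Str.isIn kt.1 tl || PySem.Str.isIn kt.1 body then kt.2 else [])) := by
    funext raw kt
    split_ifs <;> simp
  rw [h, PySem.List.foldl_append_eq_flatMap]

-- every element of a strictly increasing as ++ [l] is ≤ l
theorem pv_le_last (as : List String) (l x : String)
    (h : (as ++ [l]).Pairwise (· < ·)) (hx : x ∈ as ++ [l]) : x ≤ l := by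
  rcases List.mem_append.mp hx with h1 | h2
  · exact le_of_lt ((List.pairwise_append.mp h).2.2 x h1 l (by simp))
  · simp only [List.mem_singleton] at h2
    exact le_of_eq h2

-- loop invariant of the dedup scan: the accumulator stays strictly increasing,
-- ≤ everything still to come, and collects exactly the elements seen
theorem pv_uniq_inv (xs : List String) : ∀ (acc : List String),
    acc.Pairwise (· < ·) →
    xs.Pairwise (· ≤ ·) →
    (∀ a ∈ acc, ∀ b ∈ xs, a ≤ b) →
    (xs.foldl (fun out t =>
        if out.isEmpty || (PySem.List.pyGetD out (-1) "" != t) then out ++ [t] else out) acc).Pairwise (· < ·)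
    ∧ (∀ y, y ∈ xs.foldl (fun out t =>
        if out.isEmpty || (PySem.List.pyGetD out (-1) "" != t) then out ++ [t] else out) acc
        ↔ y ∈ acc ∨ y ∈ xs) := by
  induction xs with
  | nil => intro acc h1 _ _; exact ⟨h1, by simp⟩
  | cons x rest ih =>
    intro acc h1 h2 h3
    rw [List.pairwise_cons] at h2
    obtain ⟨hx, hrest⟩ := h2
    rw [List.foldl_cons]
    rcases List.eq_nil_or_concat acc with rfl | ⟨as, l, rfl⟩
    · -- acc = []: the element is appended
      have e : (if List.isEmpty ([] : List String) || (PySem.List.pyGetD [] (-1) "" != x)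
          then ([] : List String) ++ [x] else []) = [x] := by simp
      rw [e]
      obtain ⟨p1, p2⟩ := ih [x] (by simp) hrest (by simpa using hx)
      refine ⟨p1, fun y => ?_⟩
      rw [p2 y]
      simp only [List.mem_cons, List.not_mem_nil, false_or]
      tauto
    · -- acc = as ++ [l]
      simp only [List.concat_eq_append] at h1 h3 ⊢
      have hlast : PySem.List.pyGetD (as ++ [l]) (-1) "" = l :=
        PySem.List.pyGetD_neg_one_append_singleton as l ""
      by_cases hlx : l = x
      · -- duplicate of the last kept element: skipped
        have e : (if (as ++ [l]).isEmpty || (PySem.List.pyGetD (as ++ [l]) (-1) "" != x)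
            then (as ++ [l]) ++ [x] else as ++ [l]) = as ++ [l] := by
          simp [hlx]
        rw [e]
        obtain ⟨p1, p2⟩ := ih (as ++ [l]) h1 hrest
          (fun a ha b hb => h3 a ha b (List.mem_cons_of_mem x hb))
        refine ⟨p1, fun y => ?_⟩
        rw [p2 y]
        have hxmem : x ∈ as ++ [l] := by simp [← hlx]
        simp only [List.mem_cons]
        constructor
        · rintro (h | h) <;> tauto
        · rintro (h | rfl | h)
          · tauto
          · exact Or.inl hxmem
          · tauto
      · -- new element: appended
        have e : (if (as ++ [l]).isEmpty || (PySem.List.pyGetD (as ++ [l]) (-1) "" != x)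
            then (as ++ [l]) ++ [x] else as ++ [l]) = (as ++ [l]) ++ [x] := by
          simp [hlast, hlx]
        rw [e]
        have hpw' : ((as ++ [l]) ++ [x]).Pairwise (· < ·) := by
          rw [List.pairwise_append]
          refine ⟨h1, by simp, fun a ha z hz => ?_⟩
          simp only [List.mem_singleton] at hz
          have hax : a ≤ x := h3 a ha x (by simp)
          have halx : a ≤ l := pv_le_last as l a h1 ha
          have hne : a ≠ x := by
            intro hax2
            exact hlx (le_antisymm (h3 l (by simp) x (by simp)) (hax2 ▸ halx))
          rw [hz]
          exact lt_of_le_of_ne hax hne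
        have hle' : ∀ a ∈ (as ++ [l]) ++ [x], ∀ b ∈ rest, a ≤ b := by
          intro a ha b hb
          rcases List.mem_append.mp ha with h | h
          · exact h3 a h b (List.mem_cons_of_mem x hb)
          · simp only [List.mem_singleton] at h
            subst h
            exact hx b hb
        obtain ⟨p1, p2⟩ := ih ((as ++ [l]) ++ [x]) hpw' hrest hle'
        refine ⟨p1, fun y => ?_⟩
        rw [p2 y]
        simp only [List.mem_append, List.mem_cons]
        tauto

theorem pv_mem_uniq (l : List String) (h : l.Pairwise (· ≤ ·)) (x : String) :
    x ∈ pvUniqSorted l ↔ x ∈ l := by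
  unfold pvUniqSorted
  rw [(pv_uniq_inv l [] (by simp) h (by simp)).2 x]
  simp

theorem pv_pairwise_uniq (l : List String) (h : l.Pairwise (· ≤ ·)) :
    (pvUniqSorted l).Pairwise (· < ·) :=
  (pv_uniq_inv l [] (by simp) h (by simp)).1

-- membership through A's conditional set updates, flattened
theorem pv_mem_ite_update (c : Prop) [Decidable c] (s : PySem.Set String) (l : List String) (x : String) :
    (x ∈ if c then PySem.Set.update s l else s) ↔ x ∈ s ∨ (c ∧ x ∈ l) := by
  split_ifs with h <;> simp [PySem.Set.mem_update, h]

theorem pv_mem_ite_add (c : Prop) [Decidable c] (s : PySem.Set String) (y x : String) :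
    (x ∈ if c then PySem.Set.add s y else s) ↔ x ∈ s ∨ (c ∧ x = y) := by
  split_ifs with h <;> simp [PySem.Set.mem_add, h]

-- sorted(set S) equals sort-then-adjacent-dedup of any list with the same elements
theorem pv_sorted_set_eq (S raw : List String) (hnd : S.Nodup) (hmem : ∀ x, x ∈ S ↔ x ∈ raw) :
    PySem.List.sorted S (fun x => x) false = pvUniqSorted (PySem.List.sorted raw (fun x => x) false) := by
  have hs : (PySem.List.sorted raw (fun x => x) false).Pairwise (· ≤ ·) := by
    simpa using PySem.List.sorted_pairwise (xs := raw) (key := fun x : String => x)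
  have hpw : (pvUniqSorted (PySem.List.sorted raw (fun x => x) false)).Pairwise (· < ·) :=
    pv_pairwise_uniq _ hs
  have hnd2 : (pvUniqSorted (PySem.List.sorted raw (fun x => x) false)).Nodup :=
    hpw.imp (fun h => ne_of_lt h)
  have hperm : (pvUniqSorted (PySem.List.sorted raw (fun x => x) false)).Perm S := by
    rw [List.perm_ext_iff_of_nodup hnd2 hnd]
    intro x
    rw [pv_mem_uniq _ hs, PySem.List.mem_sorted, ← hmem]
  exact PySem.List.sorted_eq_of_perm_of_pairwise_lt _ _ _ hperm hpw

-- ===== VERDICT (by name: the statement is the Claim_ definition above) =====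
set_option maxHeartbeats 1000000 in
theorem convert_categories_to_tags_spec : Claim_equal_convert_categories_to_tags := by
  unfold Claim_equal_convert_categories_to_tags
  intro categories title content _
  unfold Spec_convert_categories_to_tags convert_categories_to_tags convert_categories_to_tags_alt
  by_cases hemp : categories.isEmpty = true
  · rw [List.isEmpty_iff.mp hemp]
    rfl
  · rw [if_neg hemp]
    simp only [pv_loop_eq_ofList, pv_raw_eq_flatMap, pv_title_eq, pv_kw_foldl]
    by_cases hc : categories.contains "Code" = true
    · rw [if_pos hc, if_pos hc]
      apply pv_sorted_set_eq
      · split_ifs <;>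
          (repeat first | apply PySem.Set.nodup_add | apply PySem.Set.nodup_update) <;>
          exact List.nodup_nil
      · intro x
        simp only [KEYWORD_TAGS, List.flatMap_cons, List.flatMap_nil, List.append_nil,
          List.mem_append, List.mem_ite_nil_right, List.any_cons, List.any_nil,
          Bool.or_eq_true, pv_mem_ite_update, pv_mem_ite_add,
          PySem.Set.mem_ofList, List.mem_cons, List.not_mem_nil, or_false]
        by_cases hx1 : x = "swift" <;> by_cases hx2 : x = "ios" <;>
          by_cases hx3 : x = "combine" <;> by_cases hx4 : x = "swiftui" <;>
          by_cases hx5 : x = "testing" <;>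
          (simp_all; try tauto)
    · rw [if_neg hc, if_neg hc]
      exact pv_sorted_set_eq _ _ (PySem.Set.nodup_ofList _) (fun x => PySem.Set.mem_ofList _ _)
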